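-- pv_equiv track=rewrite | github.com/menudoproblema/mongoeco | src/mongoeco/core/collation.py | _split_uca_levels
-- ===== SOURCE A (Python) =====
-- def _split_uca_levels(key: tuple[int, ...]) -> tuple[tuple[int, ...], ...]:
--     levels: list[tuple[int, ...]] = []
--     current: list[int] = []
--     for value in key:
--         if value == 0:
--             levels.append(tuple(current))
--             current = []
--             continue
--         current.append(value)
--     if current:
--         levels.append(tuple(current))
--     return tuple(levels)
-- ===== SOURCE B (Python) =====
-- def _split_uca_levels(key):
--     zero_positions = [i for i, value in enumerate(key) if value == 0]
--     levels = []
--     start = 0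
--     for i in zero_positions:
--         levels.append(key[start:i])
--         start = i + 1
--     if start < len(key):
--         levels.append(key[start:])
--     return tuple(levels)
-- ===== Notes on version B (the rewrite author's own statement) =====
-- stated objective: alternative
-- what changed: Replaces A's single element-by-element pass that accumulates a growing 'current' run with a two-pass scheme: first collect the indices of the zero separators, then emit each level as a slice key[start:i] between consecutive zero indices (plus the trailing slice only when nonempty).
import Mathlib
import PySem

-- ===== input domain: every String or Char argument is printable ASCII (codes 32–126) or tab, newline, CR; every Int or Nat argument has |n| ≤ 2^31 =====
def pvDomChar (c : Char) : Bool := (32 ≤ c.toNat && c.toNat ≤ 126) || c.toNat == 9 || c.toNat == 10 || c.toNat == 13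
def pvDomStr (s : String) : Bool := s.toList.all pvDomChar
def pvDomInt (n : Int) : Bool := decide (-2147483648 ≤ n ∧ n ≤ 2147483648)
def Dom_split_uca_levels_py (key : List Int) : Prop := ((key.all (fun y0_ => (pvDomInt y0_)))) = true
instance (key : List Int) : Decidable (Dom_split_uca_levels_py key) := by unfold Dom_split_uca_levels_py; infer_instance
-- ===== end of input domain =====

-- B replaces A's single accumulating pass with a two-pass scheme (zero-index table, then slices); alternative decomposition, same cost.

-- ===== PORT A =====
-- one pass, state (levels, current); final nonempty 'current' is appended
def split_uca_levels_py (key : List Int) : List (List Int) :=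
  let st := key.foldl
    (fun (acc : List (List Int) × List Int) value =>
      if value == 0 then (acc.1 ++ [acc.2], ([] : List Int))
      else (acc.1, acc.2 ++ [value]))
    ([], [])
  if st.2.isEmpty then st.1 else st.1 ++ [st.2]

-- ===== PORT B =====
-- pass 1: indices of the zeros; pass 2: slice between consecutive zero indices
def split_uca_levels_py_alt (key : List Int) : List (List Int) :=
  let zero_positions : List Int :=
    ((PySem.List.enumerate key).filter (fun p => p.2 == 0)).map (fun p => p.1)
  let st := zero_positions.foldl
    (fun (acc : List (List Int) × Int) i =>
      (acc.1 ++ [PySem.List.slice key (some acc.2) (some i)], i + 1))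
    ([], 0)
  if st.2 < PySem.List.len key then st.1 ++ [PySem.List.slice key (some st.2) none] else st.1

-- ===== PRECONDITION & SPEC =====
def Spec_split_uca_levels_py (key : List Int) (out : List (List Int)) : Prop := out = split_uca_levels_py_alt key
instance (key : List Int) (out : List (List Int)) : Decidable (Spec_split_uca_levels_py key out) := by unfold Spec_split_uca_levels_py; infer_instance

-- ===== CLAIM (what is proved, stated in full; the proofs are below) =====
def Claim_equal_split_uca_levels_py : Prop := ∀ (key : List Int), Dom_split_uca_levels_py key → Spec_split_uca_levels_py key (split_uca_levels_py key)

-- ===== LEMMAS AND PROOFS =====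

-- reference recursive splitter both ports are reduced to
def pvG : List Int → List (List Int)
  | [] => []
  | x :: t => if x = 0 then [] :: pvG t
              else match pvG t with
                   | [] => [[x]]
                   | c :: cs => (x :: c) :: cs

-- A's loop body
def pvFA (acc : List (List Int) × List Int) (value : Int) : List (List Int) × List Int :=
  if value == 0 then (acc.1 ++ [acc.2], ([] : List Int)) else (acc.1, acc.2 ++ [value])

-- A's fold with pending run `cur`, characterised against pvG
lemma pvA_fold (t : List Int) : ∀ (lev : List (List Int)) (cur : List Int),
    (let st := t.foldl pvFA (lev, cur)
     if st.2.isEmpty then st.1 else st.1 ++ [st.2]) =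
    lev ++ (match pvG t with
            | [] => if cur.isEmpty then [] else [cur]
            | c :: cs => (cur ++ c) :: cs) := by
  induction t with
  | nil =>
    intro lev cur
    simp [pvG]
    cases cur <;> simp
  | cons x t ih =>
    intro lev cur
    by_cases hx : x = 0
    · subst hx
      simp only [List.foldl_cons, pvFA, beq_self_eq_true, if_pos, pvG]
      rw [ih]
      rcases h : pvG t with _ | ⟨c, cs⟩ <;> simp
    · simp only [List.foldl_cons, pvFA, beq_iff_eq, if_neg hx]
      rw [ih]
      rcases h : pvG t with _ | ⟨c, cs⟩ <;>
        simp [pvG, hx, h, List.append_assoc]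

lemma pvA_eq_G (key : List Int) : split_uca_levels_py key = pvG key := by
  have h := pvA_fold key [] []
  simp only [split_uca_levels_py]
  have hfa : (fun (acc : List (List Int) × List Int) value =>
      if value == 0 then (acc.1 ++ [acc.2], ([] : List Int))
      else (acc.1, acc.2 ++ [value])) = pvFA := by
    funext acc v; simp [pvFA]
  rw [hfa, h]
  rcases hg : pvG key with _ | ⟨c, cs⟩ <;> simp

-- zero positions of key, as Nat indices
def pvZ : List Int → List Nat
  | [] => []
  | x :: t => if x = 0 then 0 :: (pvZ t).map (· + 1) else (pvZ t).map (· + 1)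

lemma pvZ_cons_zero (t : List Int) : pvZ (0 :: t) = 0 :: (pvZ t).map (· + 1) := by simp [pvZ]

lemma pvZ_cons_ne (x : Int) (t : List Int) (hx : x ≠ 0) :
    pvZ (x :: t) = (pvZ t).map (· + 1) := by simp [pvZ, hx]

lemma pvShiftI (zs : List Nat) (s : Int) :
    (zs.map (· + 1)).map (fun n : Nat => (n : Int) + s) = zs.map (fun n : Nat => (n : Int) + (s + 1)) := by
  rw [List.map_map]
  refine List.map_congr_left ?_
  intro a _
  simp only [Function.comp]
  push_cast
  ring

lemma pvCastShift (zs : List Nat) :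
    ((zs.map (· + 1)).map (fun n : Nat => (n : Int))) = zs.map (fun n : Nat => (n : Int) + 1) := by
  rw [List.map_map]
  refine List.map_congr_left ?_
  intro a _
  simp [Function.comp]

lemma pvZ_spec (key : List Int) : ∀ (s : Int),
    ((PySem.List.enumerate key s).filter (fun p => p.2 == 0)).map (fun p => p.1) =
    (pvZ key).map (fun n : Nat => (n : Int) + s) := by
  induction key with
  | nil => intro s; simp [PySem.List.enumerate_nil, pvZ]
  | cons x t ih =>
    intro s
    rw [PySem.List.enumerate_cons]
    by_cases hx : x = 0
    · subst hx
      rw [pvZ_cons_zero]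
      simp only [List.filter_cons, beq_self_eq_true, reduceIte, List.map_cons]
      rw [ih (s + 1), pvShiftI]
      simp
    · rw [pvZ_cons_ne x t hx]
      simp only [List.filter_cons, beq_iff_eq, hx, ite_false]
      rw [ih (s + 1), pvShiftI]

-- B's loop body over `key`
def pvFB (key : List Int) (acc : List (List Int) × Int) (i : Int) : List (List Int) × Int :=
  (acc.1 ++ [PySem.List.slice key (some acc.2) (some i)], i + 1)

-- accumulator extraction for B's fold
lemma pvFB_acc (key : List Int) (zs : List Int) : ∀ (acc : List (List Int)) (s : Int),
    zs.foldl (pvFB key) (acc, s) =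
    (acc ++ (zs.foldl (pvFB key) ([], s)).1, (zs.foldl (pvFB key) ([], s)).2) := by
  induction zs with
  | nil => intro acc s; simp
  | cons i zs ih =>
    intro acc s
    simp only [List.foldl_cons, pvFB]
    rw [ih (acc ++ [PySem.List.slice key (some s) (some i)]) (i + 1),
       ih ([] ++ [PySem.List.slice key (some s) (some i)]) (i + 1)]
    simp

-- B's running start index stays a natural number
lemma pvFB_snd (key : List Int) (zs : List Nat) : ∀ (acc : List (List Int)) (s : Nat),
    ∃ m : Nat, ((zs.map (fun n : Nat => (n : Int))).foldl (pvFB key) (acc, (s : Int))).2 = (m : Int) := by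
  induction zs with
  | nil => intro acc s; exact ⟨s, rfl⟩
  | cons i zs ih =>
    intro acc s
    simp only [List.map_cons, List.foldl_cons, pvFB]
    have h1 : (i : Int) + 1 = ((i + 1 : Nat) : Int) := by push_cast; ring
    rw [h1]
    exact ih _ (i + 1)

-- dropping one leading element shifts every slice bound by one
lemma pvSliceShift (x : Int) (t : List Int) (s i : Nat) :
    PySem.List.slice (x :: t) (some ((s : Int) + 1)) (some ((i : Int) + 1)) =
    PySem.List.slice t (some (s : Int)) (some (i : Int)) := by
  have h1 : ((s : Int) + 1) = ((s + 1 : Nat) : Int) := by push_cast; ring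
  have h2 : ((i : Int) + 1) = ((i + 1 : Nat) : Int) := by push_cast; ring
  rw [h1, h2, PySem.List.slice_natCast, PySem.List.slice_natCast]
  simp [Nat.add_sub_add_right]

lemma pvDropShift (x : Int) (t : List Int) (m : Nat) :
    PySem.List.slice (x :: t) (some ((m : Int) + 1)) none =
    PySem.List.slice t (some (m : Int)) none := by
  have h1 : ((m : Int) + 1) = ((m + 1 : Nat) : Int) := by push_cast; ring
  rw [h1, PySem.List.slice_from_natCast, PySem.List.slice_from_natCast]
  simp

-- shifting: walking shifted indices over (x :: key') = walking original indices over key', start bumped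
lemma pvFB_shift (x : Int) (key' : List Int) (zs : List Nat) :
    ∀ (acc : List (List Int)) (s : Nat),
    (zs.map (fun n : Nat => (n : Int) + 1)).foldl (pvFB (x :: key')) (acc, (s : Int) + 1) =
    (((zs.map (fun n : Nat => (n : Int))).foldl (pvFB key') (acc, (s : Int))).1,
     ((zs.map (fun n : Nat => (n : Int))).foldl (pvFB key') (acc, (s : Int))).2 + 1) := by
  induction zs with
  | nil => intro acc s; simp
  | cons i zs ih =>
    intro acc s
    simp only [List.map_cons, List.foldl_cons, pvFB]
    rw [pvSliceShift]
    have h1 : ((i : Int) + 1) + 1 = ((i + 1 : Nat) : Int) + 1 := by push_cast; ring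
    have h2 : ((i : Int) + 1) = ((i + 1 : Nat) : Int) := by push_cast; ring
    rw [h1, h2, ih (acc ++ [PySem.List.slice key' (some (s : Int)) (some (i : Int))]) (i + 1)]

-- core of B over Nat zero positions
def pvBCore (key : List Int) : List (List Int) :=
  let st := ((pvZ key).map (fun n : Nat => (n : Int))).foldl (pvFB key) ([], (0 : Int))
  if st.2 < PySem.List.len key then st.1 ++ [PySem.List.slice key (some st.2) none] else st.1

lemma pvB_eq_core (key : List Int) : split_uca_levels_py_alt key = pvBCore key := by
  simp only [split_uca_levels_py_alt, pvBCore]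
  have hz := pvZ_spec key 0
  simp only [add_zero] at hz
  have hfb : (fun (acc : List (List Int) × Int) i =>
      (acc.1 ++ [PySem.List.slice key (some acc.2) (some i)], i + 1)) = pvFB key := by
    funext acc i; simp [pvFB]
  rw [hfb, hz]

lemma pvBCore_cons_zero (t : List Int) : pvBCore (0 :: t) = [] :: pvBCore t := by
  obtain ⟨m, hm⟩ := pvFB_snd t (pvZ t) [] 0
  push_cast at hm
  simp only [pvBCore, pvZ_cons_zero, List.map_cons, pvCastShift, List.foldl_cons, pvFB,
    Nat.cast_zero, zero_add, List.nil_append]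
  have hslice0 : PySem.List.slice (0 :: t) (some (0 : Int)) (some (0 : Int)) = ([] : List Int) := by
    have h0 : ((0 : Nat) : Int) = (0 : Int) := by norm_num
    rw [← h0, PySem.List.slice_natCast]
    simp
  rw [hslice0]
  have hsh := pvFB_shift 0 t (pvZ t) [([] : List Int)] 0
  push_cast at hsh
  rw [hsh]
  rw [pvFB_acc t ((pvZ t).map (fun n : Nat => (n : Int))) [([] : List Int)] 0, hm]
  have hlen : PySem.List.len (0 :: t) = PySem.List.len t + 1 := by
    simp [PySem.List.len_eq]
  rw [hlen]
  by_cases hc : (m : Int) < PySem.List.len t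
  · rw [if_pos (by omega : (m : Int) + 1 < PySem.List.len t + 1), if_pos hc, pvDropShift]
    simp
  · rw [if_neg (by omega : ¬ ((m : Int) + 1 < PySem.List.len t + 1)), if_neg hc]
    simp

lemma pvBCore_cons_ne (x : Int) (t : List Int) (hx : x ≠ 0) :
    pvBCore (x :: t) = match pvBCore t with
                       | [] => [[x]]
                       | c :: cs => (x :: c) :: cs := by
  rcases hzt : pvZ t with _ | ⟨i, rest⟩
  · -- the key contains no zero: B emits the single full slice
    simp only [pvBCore, pvZ_cons_ne x t hx, hzt, List.map_nil, List.foldl_nil]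
    have hlen : PySem.List.len (x :: t) = ((t.length : Int)) + 1 := by
      simp [PySem.List.len_eq]
    have hlen' : PySem.List.len t = ((t.length : Int)) := by simp [PySem.List.len_eq]
    rw [hlen, hlen']
    rw [if_pos (by omega : (0 : Int) < (t.length : Int) + 1)]
    have h0 : ((0 : Nat) : Int) = (0 : Int) := by norm_num
    have hfull : PySem.List.slice (x :: t) (some (0 : Int)) none = x :: t := by
      rw [← h0, PySem.List.slice_from_natCast]
      simp
    rw [hfull]
    rcases t with _ | ⟨y, t'⟩
    · simp
    · rw [if_pos (by exact_mod_cast (y :: t').length.pos_of_ne_zero (by simp) :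
        (0 : Int) < ((y :: t').length : Int))]
      have hfull' : PySem.List.slice (y :: t') (some (0 : Int)) none = y :: t' := by
        rw [← h0, PySem.List.slice_from_natCast]
        simp
      rw [hfull']
      simp
  · -- the first zero of the key sits at index i + 1
    obtain ⟨m, hm⟩ := pvFB_snd t rest [] (i + 1)
    push_cast at hm
    simp only [pvBCore, pvZ_cons_ne x t hx, hzt, List.map_cons, pvCastShift, List.foldl_cons,
      pvFB, List.nil_append]
    push_cast
    have hhead : PySem.List.slice (x :: t) (some (0 : Int)) (some ((i : Int) + 1)) =
        x :: PySem.List.slice t (some (0 : Int)) (some (i : Int)) := by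
      have h0 : ((0 : Nat) : Int) = (0 : Int) := by norm_num
      have h1 : ((i : Int) + 1) = ((i + 1 : Nat) : Int) := by push_cast; ring
      rw [← h0, h1, PySem.List.slice_natCast, PySem.List.slice_natCast]
      simp
    rw [hhead]
    have hsh := pvFB_shift x t rest
      [x :: PySem.List.slice t (some (0 : Int)) (some (i : Int))] (i + 1)
    push_cast at hsh
    rw [hsh]
    rw [pvFB_acc t (rest.map (fun n : Nat => (n : Int)))
        [x :: PySem.List.slice t (some (0 : Int)) (some (i : Int))] ((i : Int) + 1),
      pvFB_acc t (rest.map (fun n : Nat => (n : Int)))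
        [PySem.List.slice t (some (0 : Int)) (some (i : Int))] ((i : Int) + 1),
      hm]
    have hlen : PySem.List.len (x :: t) = PySem.List.len t + 1 := by
      simp [PySem.List.len_eq]
    rw [hlen]
    by_cases hc : (m : Int) < PySem.List.len t
    · rw [if_pos (by omega : (m : Int) + 1 < PySem.List.len t + 1), if_pos hc, pvDropShift]
      simp
    · rw [if_neg (by omega : ¬ ((m : Int) + 1 < PySem.List.len t + 1)), if_neg hc]
      simp

lemma pvBCore_eq_G (key : List Int) : pvBCore key = pvG key := by
  induction key with
  | nil => simp [pvBCore, pvZ, PySem.List.len, pvG]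
  | cons x t ih =>
    by_cases hx : x = 0
    · subst hx
      rw [pvBCore_cons_zero, ih]
      simp [pvG]
    · rw [pvBCore_cons_ne x t hx, ih]
      simp only [pvG, if_neg hx]

-- ===== VERDICT (by name: the statement is the Claim_ definition above) =====
theorem split_uca_levels_py_spec : Claim_equal_split_uca_levels_py := by
  intro key _
  unfold Spec_split_uca_levels_py
  rw [pvA_eq_G, pvB_eq_core, pvBCore_eq_G]
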